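-- pv_equiv track=rewrite | github.com/Fondamenti18/fondamenti-di-programmazione | students/1464148/homework01/program03.py | crea_lista_disordinata
-- ===== SOURCE A (Python) =====
-- def crea_lista_disordinata (st):
--    lnum = []
--    lbool =  []
--    lbool += [False]*97
--    lbool += [True]*26
--
--    for i in range(len(st)-1,-1,-1):
--        cod = ord(st[i])
--        if (cod<123):
--            if (lbool[cod]):
--                lnum += [cod]
--                lbool[cod]=False
--
--    lnum.reverse()
--    return lnum
-- ===== SOURCE B (Python) =====
-- def crea_lista_disordinata(st):
--     last = {}
--     for i, ch in enumerate(st):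
--         c = ord(ch)
--         if 97 <= c <= 122:
--             last[c] = i
--     return sorted(last, key=lambda c: last[c])
-- ===== Notes on version B (the rewrite author's own statement) =====
-- stated objective: simpler
-- what changed: A keeps a 123-entry boolean presence table, scans the string backwards collecting first-seen lowercase codes and reverses; B makes one forward pass recording each lowercase code's last-occurrence index in a dict and returns the keys sorted by that index.
import Mathlib
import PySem

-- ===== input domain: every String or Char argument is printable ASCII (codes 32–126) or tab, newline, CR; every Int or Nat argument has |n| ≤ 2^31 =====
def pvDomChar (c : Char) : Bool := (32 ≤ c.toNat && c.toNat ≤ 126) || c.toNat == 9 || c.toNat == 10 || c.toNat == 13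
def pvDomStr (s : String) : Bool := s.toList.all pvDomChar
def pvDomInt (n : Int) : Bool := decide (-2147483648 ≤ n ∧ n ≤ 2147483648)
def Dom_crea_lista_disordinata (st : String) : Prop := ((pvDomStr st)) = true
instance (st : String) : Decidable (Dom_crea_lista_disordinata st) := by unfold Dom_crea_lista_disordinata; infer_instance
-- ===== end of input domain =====

-- B replaces A's boolean presence table + backward scan + reverse by a forward pass
-- recording last-occurrence indices in a dict and a sort of the keys by that index (objective: simpler).


-- ===== PORT A =====
def crea_lista_disordinata (st : String) : List Int :=
  let s := st.toList
  let lbool : List Bool := List.replicate 97 false ++ List.replicate 26 true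
  let r := (PySem.List.pyRange ((s.length : Int) - 1) (-1) (-1)).foldl
    (fun (ac : List Int × List Bool) i =>
      let cod : Int := ((PySem.List.pyGetD s i ' ').toNat : Int)
      if cod < 123 then
        if PySem.List.pyGetD ac.2 cod false then
          (ac.1 ++ [cod], PySem.List.pySetD ac.2 cod false)
        else ac
      else ac) ([], lbool)
  r.1.reverse

-- ===== PORT B =====
def crea_lista_disordinata_alt (st : String) : List Int :=
  let last : PySem.Dict Int Int := (PySem.List.enumerate st.toList 0).foldl
    (fun d p =>
      let c : Int := (p.2.toNat : Int)
      if 97 ≤ c ∧ c ≤ 122 then d.insert c p.1 else d) PySem.Dict.empty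
  PySem.List.sorted last.keys (fun c => last.getD c 0) false

-- ===== PRECONDITION & SPEC =====
def Spec_crea_lista_disordinata (st : String) (out : List Int) : Prop := out = crea_lista_disordinata_alt st
instance (st : String) (out : List Int) : Decidable (Spec_crea_lista_disordinata st out) := by unfold Spec_crea_lista_disordinata; infer_instance

-- ===== CLAIM (what is proved, stated in full; the proofs are below) =====
def Claim_equal_crea_lista_disordinata : Prop := ∀ (st : String), Dom_crea_lista_disordinata st → Spec_crea_lista_disordinata st (crea_lista_disordinata st)

-- ===== LEMMAS AND PROOFS =====

/-- char code as Int -/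
def pvCode (ch : Char) : Int := (ch.toNat : Int)

/-- B's dict, restated for the lemmas (definitionally B's loop). -/
def pvDict (s : List Char) : PySem.Dict Int Int :=
  (PySem.List.enumerate s 0).foldl
    (fun d p =>
      let c : Int := (p.2.toNat : Int)
      if 97 ≤ c ∧ c ≤ 122 then d.insert c p.1 else d) PySem.Dict.empty

/-- index of first char of r with code c -/
def pvFIdx (r : List Char) (c : Int) : Nat := r.findIdx (fun ch => pvCode ch == c)

/-- model of A's backward scan: first-seen lowercase codes not in `seen` -/
def pvFs : List Char → List Int → List Int
  | [], _ => []
  | ch :: r, seen =>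
    if 97 ≤ pvCode ch ∧ pvCode ch ≤ 122 ∧ pvCode ch ∉ seen
    then pvCode ch :: pvFs r (pvCode ch :: seen)
    else pvFs r seen

theorem pvFs_congr (r : List Char) (s₁ s₂ : List Int) (h : ∀ x, x ∈ s₁ ↔ x ∈ s₂) :
    pvFs r s₁ = pvFs r s₂ := by
  induction r generalizing s₁ s₂ with
  | nil => rfl
  | cons ch r ih =>
    simp only [pvFs, h]
    split
    · exact congrArg _ (ih _ _ (by intro x; simp [h]))
    · exact ih _ _ h

theorem pvFs_mem (r : List Char) (seen : List Int) (c : Int) :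
    c ∈ pvFs r seen ↔ (97 ≤ c ∧ c ≤ 122 ∧ c ∉ seen ∧ ∃ ch ∈ r, pvCode ch = c) := by
  induction r generalizing seen with
  | nil => simp [pvFs]
  | cons ch r ih =>
    simp only [pvFs]
    split
    · rename_i hg
      obtain ⟨h1, h2, h3⟩ := hg
      constructor
      · intro hm
        rcases List.mem_cons.1 hm with h | h
        · subst h; exact ⟨h1, h2, h3, ch, List.mem_cons_self .., rfl⟩
        · have := (ih _).1 h
          refine ⟨this.1, this.2.1, ?_, ?_⟩
          · intro hc; exact this.2.2.1 (List.mem_cons_of_mem _ hc)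
          · obtain ⟨ch', hch', hcode⟩ := this.2.2.2
            exact ⟨ch', List.mem_cons_of_mem _ hch', hcode⟩
      · rintro ⟨hc1, hc2, hc3, ch', hch', hcode⟩
        by_cases hceq : c = pvCode ch
        · subst hceq; exact List.mem_cons_self ..
        · refine List.mem_cons_of_mem _ ((ih _).2 ⟨hc1, hc2, ?_, ?_⟩)
          · intro h; rcases List.mem_cons.1 h with h | h; exact hceq h; exact hc3 h
          · rcases List.mem_cons.1 hch' with h | h
            · exact absurd (h ▸ hcode).symm hceq
            · exact ⟨ch', h, hcode⟩
    · rename_i hg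
      rw [ih]
      constructor
      · rintro ⟨h1, h2, h3, ch', hch', hcode⟩
        exact ⟨h1, h2, h3, ch', List.mem_cons_of_mem _ hch', hcode⟩
      · rintro ⟨h1, h2, h3, ch', hch', hcode⟩
        refine ⟨h1, h2, h3, ?_⟩
        rcases List.mem_cons.1 hch' with h | h
        · exfalso; apply hg; rw [h] at hcode; rw [hcode]; exact ⟨h1, h2, h3⟩
        · exact ⟨ch', h, hcode⟩

theorem pvFs_nodup (r : List Char) (seen : List Int) : (pvFs r seen).Nodup := by
  induction r generalizing seen with
  | nil => simp [pvFs]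
  | cons ch r ih =>
    simp only [pvFs]
    split
    · refine List.Nodup.cons ?_ (ih _)
      intro hmem
      have := (pvFs_mem _ _ _).1 hmem
      exact this.2.2.1 (List.mem_cons_self ..)
    · exact ih _

theorem pvFs_pairwise (r : List Char) (seen : List Int) :
    (pvFs r seen).Pairwise (fun a b => pvFIdx r a < pvFIdx r b) := by
  induction r generalizing seen with
  | nil => simp [pvFs]
  | cons ch r ih =>
    have hshift : ∀ b, b ≠ pvCode ch → pvFIdx (ch :: r) b = pvFIdx r b + 1 := by
      intro b hb
      simp only [pvFIdx, List.findIdx_cons]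
      have : (pvCode ch == b) = false := by simp [hb.symm]
      simp [this]
    simp only [pvFs]
    split
    · rename_i hg
      refine List.Pairwise.cons ?_ ?_
      · intro b hb
        have hbmem := (pvFs_mem _ _ _).1 hb
        have hbne : b ≠ pvCode ch := by
          intro h; exact hbmem.2.2.1 (h ▸ List.mem_cons_self ..)
        have h0 : pvFIdx (ch :: r) (pvCode ch) = 0 := by
          simp [pvFIdx, List.findIdx_cons]
        rw [h0, hshift b hbne]; omega
      · refine List.Pairwise.imp_of_mem ?_ (ih _)
        intro a b ha hb hab
        have hane : a ≠ pvCode ch := by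
          intro h; exact ((pvFs_mem _ _ _).1 ha).2.2.1 (by simp [h])
        have hbne : b ≠ pvCode ch := by
          intro h; exact ((pvFs_mem _ _ _).1 hb).2.2.1 (by simp [h])
        rw [hshift a hane, hshift b hbne]; omega
    · rename_i hg
      refine List.Pairwise.imp_of_mem ?_ (ih seen)
      intro a b ha hb hab
      have hane : a ≠ pvCode ch := by
        intro h
        have := (pvFs_mem _ _ _).1 ha
        apply hg; rw [← h]; exact ⟨this.1, this.2.1, this.2.2.1⟩
      have hbne : b ≠ pvCode ch := by
        intro h
        have := (pvFs_mem _ _ _).1 hb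
        apply hg; rw [← h]; exact ⟨this.1, this.2.1, this.2.2.1⟩
      rw [hshift a hane, hshift b hbne]; omega

/-- one right-append step of B's dict loop -/
theorem pvDict_append (s : List Char) (ch : Char) :
    pvDict (s ++ [ch]) =
      if 97 ≤ pvCode ch ∧ pvCode ch ≤ 122
      then (pvDict s).insert (pvCode ch) (s.length : Int)
      else pvDict s := by
  unfold pvDict
  rw [PySem.List.enumerate_append, List.foldl_append]
  simp [PySem.List.enumerate, pvCode]

theorem pvDict_mem_keys (s : List Char) (c : Int) :
    c ∈ (pvDict s).keys ↔ (97 ≤ c ∧ c ≤ 122 ∧ ∃ ch ∈ s, pvCode ch = c) := by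
  induction s using List.reverseRecOn with
  | nil => simp [pvDict, PySem.List.enumerate]
  | append_singleton s ch ih =>
    rw [pvDict_append]
    split
    · rename_i hg
      rw [PySem.Dict.mem_keys_insert, ih]
      constructor
      · rintro (h | ⟨h1, h2, ch', hch', hc⟩)
        · exact ⟨h ▸ hg.1, h ▸ hg.2, ch, by simp, h.symm⟩
        · exact ⟨h1, h2, ch', by simp [hch'], hc⟩
      · rintro ⟨h1, h2, ch', hch', hc⟩
        rcases List.mem_append.1 hch' with h | h
        · exact Or.inr ⟨h1, h2, ch', h, hc⟩
        · simp only [List.mem_singleton] at h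
          exact Or.inl (by rw [← hc, h])
    · rename_i hg
      rw [ih]
      constructor
      · rintro ⟨h1, h2, ch', hch', hc⟩
        exact ⟨h1, h2, ch', by simp [hch'], hc⟩
      · rintro ⟨h1, h2, ch', hch', hc⟩
        rcases List.mem_append.1 hch' with h | h
        · exact ⟨h1, h2, ch', h, hc⟩
        · simp only [List.mem_singleton] at h
          exfalso
          rw [h] at hc
          exact hg (by rw [hc]; exact ⟨h1, h2⟩)

theorem pvDict_nodup_keys (s : List Char) : (pvDict s).keys.Nodup := by
  induction s using List.reverseRecOn with
  | nil => simp [pvDict, PySem.List.enumerate, PySem.Dict.keys_empty]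
  | append_singleton s ch ih =>
    rw [pvDict_append]
    split
    · exact PySem.Dict.nodup_keys_insert _ _ _ ih
    · exact ih

theorem pvDict_getD (s : List Char) (c : Int) (h1 : 97 ≤ c) (h2 : c ≤ 122)
    (hp : ∃ ch ∈ s, pvCode ch = c) :
    (pvDict s).getD c 0 = (s.length : Int) - 1 - (pvFIdx s.reverse c : Int) := by
  induction s using List.reverseRecOn with
  | nil => simp at hp
  | append_singleton s ch ih =>
    rw [pvDict_append]
    have hrev : (s ++ [ch]).reverse = ch :: s.reverse := by simp
    by_cases hceq : pvCode ch = c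
    · rw [if_pos (by rw [hceq]; exact ⟨h1, h2⟩)]
      rw [hceq, PySem.Dict.getD_insert_self]
      have hf : pvFIdx ((s ++ [ch]).reverse) c = 0 := by
        rw [hrev]
        simp [pvFIdx, List.findIdx_cons, hceq]
      rw [hf]
      simp
    · obtain ⟨ch', hch', hc⟩ := hp
      rcases List.mem_append.1 hch' with hm | hm
      swap
      · simp only [List.mem_singleton] at hm
        exact absurd (hm ▸ hc) hceq
      have hf : pvFIdx ((s ++ [ch]).reverse) c = pvFIdx s.reverse c + 1 := by
        rw [hrev]
        simp only [pvFIdx, List.findIdx_cons]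
        have : (pvCode ch == c) = false := by simp [hceq]
        simp [this]
      have hfs := ih ⟨ch', hm, hc⟩
      have hlt : pvFIdx s.reverse c < s.reverse.length :=
        List.findIdx_lt_length.2 ⟨ch', by simp [hm], by simp [hc]⟩
      rw [List.length_reverse] at hlt
      split
      · rw [PySem.Dict.getD_insert_of_ne _ _ _ (fun h => hceq h.symm), hfs, hf]
        simp only [List.length_append, List.length_singleton]
        push_cast
        omega
      · rw [hfs, hf]
        simp only [List.length_append, List.length_singleton]
        push_cast
        omega

/-- A's loop body, fused over characters. -/
def pvStepA (ac : List Int × List Bool) (ch : Char) : List Int × List Bool :=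
  let cod : Int := (ch.toNat : Int)
  if cod < 123 then
    if PySem.List.pyGetD ac.2 cod false then
      (ac.1 ++ [cod], PySem.List.pySetD ac.2 cod false)
    else ac
  else ac

theorem pvFold (r : List Char) : ∀ (acc : List Int) (B : List Bool), B.length = 123 →
    (∀ k : Nat, k < 123 → (B.getD k false = true ↔ (97 ≤ (k : Int) ∧ ((k : Int) ∉ acc)))) →
    (r.foldl pvStepA (acc, B)).1 = acc ++ pvFs r acc := by
  induction r with
  | nil => intro acc B _ _; simp [pvFs]
  | cons ch r ih =>
    intro acc B hlen hinv
    have hcnn : (0:Int) ≤ (ch.toNat : Int) := by positivity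
    simp only [List.foldl_cons, pvFs]
    by_cases hlt : (ch.toNat : Int) < 123
    · have hklt : ch.toNat < 123 := by exact_mod_cast hlt
      have hget : PySem.List.pyGetD B ((ch.toNat : Int)) false = B.getD ch.toNat false := by
        rw [PySem.List.pyGetD_eq_getElem B false hcnn (by simp [hlen]; exact_mod_cast hlt)]
        rw [List.getD_eq_getElem _ _ (by omega)]
        simp
      by_cases hb : B.getD ch.toNat false = true
      · have hgd := (hinv ch.toNat hklt).1 hb
        have hstep : pvStepA (acc, B) ch =
            (acc ++ [(ch.toNat : Int)], PySem.List.pySetD B ((ch.toNat : Int)) false) := by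
          simp only [pvStepA, hget]
          rw [if_pos hlt, if_pos hb]
        rw [hstep]
        have hset : PySem.List.pySetD B ((ch.toNat : Int)) false = B.set ch.toNat false := by
          rw [PySem.List.pySetD_of_nonneg (xs:=B) (v:=false) hcnn]
          simp
        rw [if_pos (show 97 ≤ pvCode ch ∧ pvCode ch ≤ 122 ∧ pvCode ch ∉ acc by
          simp only [pvCode]; exact ⟨hgd.1, by omega, hgd.2⟩)]
        rw [hset]
        rw [ih (acc ++ [(ch.toNat : Int)]) (B.set ch.toNat false) (by simp [hlen])]
        · rw [pvFs_congr r (acc ++ [(ch.toNat : Int)]) ((ch.toNat : Int) :: acc)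
            (by intro x; simp [or_comm])]
          simp [pvCode]
        · intro k hk
          rw [List.getD_eq_getElem _ _ (by simp [hlen]; omega)]
          rw [List.getElem_set]
          by_cases hke : ch.toNat = k
          · subst hke
            rw [if_pos rfl]
            constructor
            · intro h; exact absurd h (by simp)
            · rintro ⟨-, hnm⟩
              exact absurd (by simp) hnm
          · rw [if_neg hke]
            rw [← List.getD_eq_getElem _ false (by omega), hinv k hk]
            have : ((k : Int) ∈ acc ++ [(ch.toNat : Int)]) ↔ (k : Int) ∈ acc := by
              simp
              intro h
              exact absurd (by exact_mod_cast h.symm) hke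
            constructor
            · rintro ⟨h1, h2⟩; exact ⟨h1, fun hm => h2 (this.1 hm)⟩
            · rintro ⟨h1, h2⟩; exact ⟨h1, fun hm => h2 (this.2 hm)⟩
      · have hstep : pvStepA (acc, B) ch = (acc, B) := by
          simp only [pvStepA, hget]
          rw [if_pos hlt, if_neg hb]
        have hnot : ¬ (97 ≤ pvCode ch ∧ pvCode ch ≤ 122 ∧ pvCode ch ∉ acc) := by
          intro hcon
          apply hb
          exact (hinv ch.toNat hklt).2 ⟨hcon.1, hcon.2.2⟩
        rw [hstep, if_neg hnot]
        exact ih acc B hlen hinv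
    · have hstep : pvStepA (acc, B) ch = (acc, B) := by
        simp only [pvStepA]
        rw [if_neg hlt]
      have hnot : ¬ (97 ≤ pvCode ch ∧ pvCode ch ≤ 122 ∧ pvCode ch ∉ acc) := by
        rintro ⟨-, h2, -⟩
        simp only [pvCode] at h2
        omega
      rw [hstep, if_neg hnot]
      exact ih acc B hlen hinv

-- A's fold equals pvFs on the reversed string
set_option maxRecDepth 8000 in
set_option maxHeartbeats 1000000 in
theorem pvA_eq (st : String) :
    crea_lista_disordinata st = (pvFs st.toList.reverse []).reverse := by
  unfold crea_lista_disordinata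
  simp only []
  have hrange : PySem.List.pyRange ((st.toList.length : Int) - 1) (-1) (-1)
      = (PySem.List.pyRange 0 (st.toList.length : Int) 1).reverse := by
    have h := PySem.List.pyRange_neg_one_eq_reverse ((st.toList.length : Int) - 1) (-1)
    simpa using h
  rw [hrange]
  have hmap : (PySem.List.pyRange 0 (st.toList.length : Int) 1).map
      (fun j => PySem.List.pyGetD st.toList j ' ') = st.toList :=
    PySem.List.map_pyGetD_pyRange_zero' st.toList ' '
  have hfuse : ∀ (l : List Int) init, (l.foldl
      (fun (ac : List Int × List Bool) i =>
        let cod : Int := ((PySem.List.pyGetD st.toList i ' ').toNat : Int)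
        if cod < 123 then
          if PySem.List.pyGetD ac.2 cod false then
            (ac.1 ++ [cod], PySem.List.pySetD ac.2 cod false)
          else ac
        else ac) init)
      = (l.map (fun j => PySem.List.pyGetD st.toList j ' ')).foldl pvStepA init := by
    intro l init
    rw [List.foldl_map]
    rfl
  rw [hfuse, List.map_reverse, hmap]
  rw [pvFold st.toList.reverse [] (List.replicate 97 false ++ List.replicate 26 true)
    (by simp) (by intro k hk; simp only [List.not_mem_nil, not_false_iff, and_true]; revert k; decide)]
  simp

-- ===== VERDICT (by name: the statement is the Claim_ definition above) =====
theorem pvAlt_eq (st : String) :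
    crea_lista_disordinata_alt st
      = PySem.List.sorted (pvDict st.toList).keys (fun c => (pvDict st.toList).getD c 0) false := rfl

theorem crea_lista_disordinata_spec : Claim_equal_crea_lista_disordinata := by
  unfold Claim_equal_crea_lista_disordinata
  intro st _
  unfold Spec_crea_lista_disordinata
  rw [pvA_eq, pvAlt_eq]
  have hnodupA : ((pvFs st.toList.reverse []).reverse).Nodup := by
    rw [List.nodup_reverse]; exact pvFs_nodup _ _
  have hmemA : ∀ c, c ∈ (pvFs st.toList.reverse []).reverse ↔
      (97 ≤ c ∧ c ≤ 122 ∧ ∃ ch ∈ st.toList, pvCode ch = c) := by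
    intro c
    rw [List.mem_reverse, pvFs_mem]
    simp
  have hperm : ((pvFs st.toList.reverse []).reverse).Perm (pvDict st.toList).keys := by
    rw [List.perm_ext_iff_of_nodup hnodupA (pvDict_nodup_keys _)]
    intro c
    rw [hmemA c, pvDict_mem_keys]
  have hpw : ((pvFs st.toList.reverse []).reverse).Pairwise
      (fun a b => (pvDict st.toList).getD a 0 < (pvDict st.toList).getD b 0) := by
    rw [List.pairwise_reverse]
    refine List.Pairwise.imp_of_mem ?_ (pvFs_pairwise st.toList.reverse [])
    intro a b ha hb hab
    have hma := (pvFs_mem _ _ _).1 ha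
    have hmb := (pvFs_mem _ _ _).1 hb
    have hpa : ∃ ch ∈ st.toList, pvCode ch = a := by
      obtain ⟨ch, hch, hc⟩ := hma.2.2.2
      exact ⟨ch, List.mem_reverse.1 hch, hc⟩
    have hpb : ∃ ch ∈ st.toList, pvCode ch = b := by
      obtain ⟨ch, hch, hc⟩ := hmb.2.2.2
      exact ⟨ch, List.mem_reverse.1 hch, hc⟩
    rw [pvDict_getD _ _ hma.1 hma.2.1 hpa, pvDict_getD _ _ hmb.1 hmb.2.1 hpb]
    have hla : pvFIdx st.toList.reverse a < st.toList.reverse.length := by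
      obtain ⟨ch, hch, hc⟩ := hma.2.2.2
      exact List.findIdx_lt_length.2 ⟨ch, hch, by simp [hc]⟩
    have hlb : pvFIdx st.toList.reverse b < st.toList.reverse.length := by
      obtain ⟨ch, hch, hc⟩ := hmb.2.2.2
      exact List.findIdx_lt_length.2 ⟨ch, hch, by simp [hc]⟩
    rw [List.length_reverse] at hla hlb
    omega
  exact (PySem.List.sorted_eq_of_perm_of_pairwise_lt _ _ _ hperm hpw).symm
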